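-- pv_equiv track=rewrite | github.com/tresoldi/asymcat | catcoocc/utils.py | collect_observations
-- ===== SOURCE A (Python) =====
-- from collections import Counter
-- from itertools import chain, combinations, product
--
-- def collect_observations(cooccs):
--     """
--     Build a dictionary of observations for all possible correspondences.
--
--     The counts of observations are derived from typical organization in
--     a non-squared contingency table, using indexes 0, 1, and 2, where
--     0 means that the identity is not considered (so that "00" would refer to
--     all correspondence pairs), 1 that there is a match, and 2 that there is
--     a mismatch. In more detail, given a pair of symbols `x` and `y`,
--     the counts of co-occurrences will be:
--
--     - obs["10"]: number of pairs matching `x` (with any `y`)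
--     - obs["20"]: number of pairs not matching `x` (with any `y`)
--     - obs["01"]: number of pairs matching `y` (with any `x`)
--     - obs["02"]: number of pairs not matching `y` (with any `x`)
--     - obs["11"]: number of pairs matching `x` and matching `y`
--     - obs["12"]: number of pairs matching `x` and not matching `y`
--     - obs["21"]: number of pairs not matching `x` and matching `y`
--     - obs["22"]: number of pairs not matching `x` and matching `Y`
--
--     Note that obs["22"] is not the number of pairs where either `x` or `y`
--     are mismatching, but where both necessarily mismatch.
--
--     When doing x->y, a non-squared contingency table will be
--
--         |            |  pair[1]  | pair[1]==y | pair[1]!=y |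
--         | pair[0]==x | obs["10"] | obs["11"]  | obs["12"]  |
--         | pair[0]!=x | obs["20"] | obs["21"]  | obs["22"]  |
--
--     :param list cooccs: A list of co-occurrence tuples.
--
--     :return dict obs: A dictionary of observations per co-occurrence type.
--     """
--
--     # Collect observation counts; while this could be done in linear fashion,
--     # especially with Python it takes too long for real data, so we need to
--     # properly cache and pre-compute stuff at the expense of memory.
--     #
--     # "00": len(cooccs)
--     # "10": len([p for p in cooccs if p[0] == a])
--     # "20": len([p for p in cooccs if p[0] != a])
--     # "01": len([p for p in cooccs if p[1] == b])
--     # "02": len([p for p in cooccs if p[1] != b])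
--     # "11": cooccs.count((a, b))
--     # "22": len([p for p in cooccs if not any([p[0] == a, p[1] == b])])
--     # "12": len([p for p in cooccs if p[0] == a and p[1] != b])
--     # "21": len([p for p in cooccs if p[0] != a and p[1] == b])
--
--     # Cache the number of co-occurrences, which is obs_00 for all pairs
--     obs_00 = len(cooccs)
--
--     # Obs['11'] is cached with a collections.Counter, so that we rely on
--     # the standard library
--     obs_11 = Counter(cooccs)
--
--     # Extract the `x` and `y` symbols, so they can be counted as well;
--     # the alphabets can be built from their respective sets. We don't
--     # use collect_alphabet() as we need the symbols as well, in order to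
--     # build `x_counter` and `y_counter`
--     symbols_x, symbols_y = zip(*cooccs)
--     x_counter, y_counter = Counter(symbols_x), Counter(symbols_y)
--     alphabet_x = set(symbols_x)
--     alphabet_y = set(symbols_y)
--
--     # Build with a dictionary comprehension
--     obs = {
--         (x, y): {
--             "00": obs_00,
--             "11": obs_11[(x, y)],
--             "10": x_counter[x],
--             "20": obs_00 - x_counter[x],
--             "01": y_counter[y],
--             "02": obs_00 - y_counter[y],
--             "12": x_counter[x] - obs_11[(x, y)],
--             "21": y_counter[y] - obs_11[(x, y)],
--             "22": obs_00 + obs_11[(x, y)] - x_counter[x] - y_counter[y],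
--         }
--         for x, y in product(alphabet_x, alphabet_y)
--     }
--
--     return obs
-- ===== SOURCE B (Python) =====
-- def collect_observations(cooccs):
--     """Naive grouped scan, the 'linear fashion' A's comment sketches: for each
--     distinct x, filter its group from the list and count y's inside it; y totals
--     by direct scans; no Counter/zip/set machinery. Returns {} on empty input."""
--     n = len(cooccs)
--     xs = list(dict.fromkeys(a for a, _ in cooccs))
--     ys = list(dict.fromkeys(b for _, b in cooccs))
--     y_tot = [(y, sum(1 for _, b in cooccs if b == y)) for y in ys]
--     obs = {}
--     for x in xs:
--         group = [b for a, b in cooccs if a == x]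
--         nx = len(group)
--         for y, ny in y_tot:
--             n11 = group.count(y)
--             obs[(x, y)] = {
--                 "00": n, "11": n11, "10": nx, "20": n - nx,
--                 "01": ny, "02": n - ny, "12": nx - n11,
--                 "21": ny - n11, "22": n + n11 - nx - ny,
--             }
--     return obs
-- ===== Notes on version B (the rewrite author's own statement) =====
-- stated objective: simpler
-- what changed: B drops all Counter/zip/set machinery and counts naively: it dedups each column in order, gets y totals by direct list scans, and for each distinct x filters that x's group out of the list and counts each y inside the group (nested filter-and-count scans instead of A's precomputed hash counters).
import Mathlib
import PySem

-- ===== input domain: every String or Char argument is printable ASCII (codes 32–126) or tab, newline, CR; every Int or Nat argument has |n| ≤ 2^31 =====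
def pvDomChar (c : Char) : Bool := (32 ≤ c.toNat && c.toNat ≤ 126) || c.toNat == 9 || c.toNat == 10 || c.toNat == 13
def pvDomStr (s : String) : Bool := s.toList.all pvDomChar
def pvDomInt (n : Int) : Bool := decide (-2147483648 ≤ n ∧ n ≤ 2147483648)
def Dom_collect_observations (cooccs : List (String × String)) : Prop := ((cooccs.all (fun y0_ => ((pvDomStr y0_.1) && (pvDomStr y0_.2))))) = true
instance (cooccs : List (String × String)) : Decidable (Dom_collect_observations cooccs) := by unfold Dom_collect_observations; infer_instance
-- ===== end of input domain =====

-- B replaces A's zip/Counter/set machinery by naive nested filter-and-count scans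
-- (ordered column dedups, per-x group filtering, per-y counts inside the group): simpler, not faster.


-- ===== PORT A =====
-- The final dict comprehension ranges over product(alphabet_x, alphabet_y): its keys are
-- pairwise distinct, so the dict's items are exactly the generated rows in generation order.
def collect_observations (cooccs : List (String × String)) : List (String × String × List (String × Int)) :=
  let obs_00 : Int := cooccs.length
  let obs_11 : PySem.Dict (String × String) Int := PySem.Dict.counter cooccs
  let symbols_x := cooccs.map Prod.fst
  let symbols_y := cooccs.map Prod.snd
  let x_counter : PySem.Dict String Int := PySem.Dict.counter symbols_x
  let y_counter : PySem.Dict String Int := PySem.Dict.counter symbols_y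
  let alphabet_x : PySem.Set String := PySem.Set.ofList symbols_x
  let alphabet_y : PySem.Set String := PySem.Set.ofList symbols_y
  alphabet_x.flatMap (fun x => alphabet_y.map (fun y =>
    (x, y,
      [("00", obs_00),
       ("11", obs_11.getD (x, y) 0),
       ("10", x_counter.getD x 0),
       ("20", obs_00 - x_counter.getD x 0),
       ("01", y_counter.getD y 0),
       ("02", obs_00 - y_counter.getD y 0),
       ("12", x_counter.getD x 0 - obs_11.getD (x, y) 0),
       ("21", y_counter.getD y 0 - obs_11.getD (x, y) 0),
       ("22", obs_00 + obs_11.getD (x, y) 0 - x_counter.getD x 0 - y_counter.getD y 0)])))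

-- ===== PORT B =====
-- dict.fromkeys dedup = PySem.List.dedup; sum(1 for … if …) = countP (sum_map_ite_one_zero);
-- the per-x group is the filtered column; keys over the nested loop are pairwise distinct,
-- so obs's items are exactly the generated rows in generation order.
def collect_observations_alt (cooccs : List (String × String)) : List (String × String × List (String × Int)) :=
  let n : Int := cooccs.length
  let xs := PySem.List.dedup (cooccs.map Prod.fst)
  let ys := PySem.List.dedup (cooccs.map Prod.snd)
  let y_tot : List (String × Int) := ys.map (fun y => (y, (cooccs.countP (fun p => p.2 == y) : Int)))
  xs.flatMap (fun x =>
    let group := (cooccs.filter (fun p => p.1 == x)).map Prod.snd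
    let nx : Int := group.length
    y_tot.map (fun yp =>
      let n11 : Int := group.count yp.1
      (x, yp.1,
        [("00", n), ("11", n11), ("10", nx), ("20", n - nx),
         ("01", yp.2), ("02", n - yp.2), ("12", nx - n11),
         ("21", yp.2 - n11), ("22", n + n11 - nx - yp.2)])))

-- ===== PRECONDITION & SPEC =====
-- Python A raises ValueError on empty cooccs (zip(*cooccs) cannot unpack); excluded here.
def Pre_collect_observations (cooccs : List (String × String)) : Prop := cooccs ≠ []
instance (cooccs : List (String × String)) : Decidable (Pre_collect_observations cooccs) := by unfold Pre_collect_observations; infer_instance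
def pvWitness_collect_observations : (List (String × String)) := ([("a", "b")])

def Spec_collect_observations (cooccs : List (String × String)) (out : List (String × String × List (String × Int))) : Prop := out = collect_observations_alt cooccs
instance (cooccs : List (String × String)) (out : List (String × String × List (String × Int))) : Decidable (Spec_collect_observations cooccs out) := by unfold Spec_collect_observations; infer_instance

-- ===== CLAIM (what is proved, stated in full; the proofs are below) =====
def Claim_equal_collect_observations : Prop := ∀ (cooccs : List (String × String)), Dom_collect_observations cooccs → Pre_collect_observations cooccs → Spec_collect_observations cooccs (collect_observations cooccs)

-- ===== LEMMAS AND PROOFS =====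

-- A's x marginal = length of B's per-x group (count in the fst column = filtered length).
theorem count_fst_eq_filter_length (l : List (String × String)) (x : String) :
    (l.map Prod.fst).count x = (l.filter (fun p => p.1 == x)).length := by
  rw [List.count_eq_countP, List.countP_map, List.countP_eq_length_filter]
  simp [Function.comp_def]

-- A's y marginal = B's direct scan of the snd column.
theorem count_snd_eq_countP (l : List (String × String)) (y : String) :
    (l.map Prod.snd).count y = l.countP (fun p => p.2 == y) := by
  simp [List.count_eq_countP, List.countP_map, Function.comp_def]

-- A's joint count = B's count of y inside the x group.
theorem count_pair_eq_group_count (l : List (String × String)) (x y : String) :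
    l.count (x, y) = ((l.filter (fun p => p.1 == x)).map Prod.snd).count y := by
  simp only [List.count_eq_countP, List.countP_map, List.countP_filter, Function.comp_def]
  apply List.countP_congr
  intro p _
  cases p
  rw [Bool.eq_iff_iff]
  simp
  tauto

-- ===== VERDICT (by name: the statement is the Claim_ definition above) =====
theorem collect_observations_spec : Claim_equal_collect_observations := by
  intro cooccs _ _
  unfold Spec_collect_observations collect_observations collect_observations_alt
  simp only [PySem.Dict.getD_counter, PySem.List.dedup_eq_ofList, List.map_map]
  congr 1
  funext x
  congr 1
  funext y
  simp only [Function.comp_def, count_fst_eq_filter_length, count_snd_eq_countP,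
    count_pair_eq_group_count, List.length_map]
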